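-- pv_equiv track=rewrite | github.com/alexandresilvapires/NLP_Proj2 | metrics.py | agreement_matrix
-- ===== SOURCE A (Python) =====
-- def agreement_matrix(guesses):
--
--     def string_to_index(cat):
--         if(cat == "GEOGRAPHY"):
--             return 0
--         elif(cat == "MUSIC"):
--             return 1
--         elif(cat == "LITERATURE"):
--             return 2
--         elif(cat == "HISTORY"):
--             return 3
--         else:
--             return 4
--
--     matrix =   [[0,0,0,0,0],
--                 [0,0,0,0,0],
--                 [0,0,0,0,0],
--                 [0,0,0,0,0],
--                 [0,0,0,0,0]]
--
--     for guess in guesses: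
--         i = string_to_index(guess[0])
--         j = string_to_index(guess[1])
--         matrix[i][j] += 1
--
--     return matrix
-- ===== SOURCE B (Python) =====
-- def agreement_matrix(guesses):
--
--     def string_to_index(cat):
--         if(cat == "GEOGRAPHY"):
--             return 0
--         elif(cat == "MUSIC"):
--             return 1
--         elif(cat == "LITERATURE"):
--             return 2
--         elif(cat == "HISTORY"):
--             return 3
--         else:
--             return 4
--
--     return [[sum(1 for g in guesses
--                  if string_to_index(g[0]) == i and string_to_index(g[1]) == j)
--              for j in range(5)]
--             for i in range(5)]
-- ===== Notes on version B (the rewrite author's own statement) =====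
-- stated objective: alternative
-- what changed: B has no mutable matrix and no per-guess increment: it builds the 5x5 grid directly with a nested comprehension where each cell (i,j) is computed by counting, in its own pass over the guesses, the guesses whose index pair equals (i,j).
import Mathlib
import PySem

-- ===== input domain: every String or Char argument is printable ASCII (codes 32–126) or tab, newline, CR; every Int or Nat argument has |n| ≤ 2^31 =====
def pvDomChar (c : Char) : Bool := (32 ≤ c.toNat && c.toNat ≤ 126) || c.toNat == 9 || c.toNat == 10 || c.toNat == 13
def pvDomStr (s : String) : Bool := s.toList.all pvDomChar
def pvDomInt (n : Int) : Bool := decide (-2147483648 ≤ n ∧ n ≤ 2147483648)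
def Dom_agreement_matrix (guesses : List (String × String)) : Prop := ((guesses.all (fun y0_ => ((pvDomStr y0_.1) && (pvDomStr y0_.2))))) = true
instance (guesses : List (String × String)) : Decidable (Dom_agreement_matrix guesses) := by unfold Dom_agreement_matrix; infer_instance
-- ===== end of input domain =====

-- B drops A's mutable 5x5 matrix and per-guess increment: it emits the grid directly,
-- computing each cell by its own counting pass over the guesses (alternative; same result).

-- ===== PORT A =====
-- shared helper: the Python inner function string_to_index (identical in A and B)
def pvStringToIndex (cat : String) : Nat :=
  if cat = "GEOGRAPHY" then 0
  else if cat = "MUSIC" then 1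
  else if cat = "LITERATURE" then 2
  else if cat = "HISTORY" then 3
  else 4

-- A's loop body: matrix[i][j] += 1 for one guess
def pvStepA (m : List (List Int)) (g : String × String) : List (List Int) :=
  let i := pvStringToIndex g.1
  let j := pvStringToIndex g.2
  m.set i ((m.getD i []).set j ((m.getD i []).getD j 0 + 1))

-- A: start from the literal 5x5 zero matrix, increment cell (i,j) per guess
def agreement_matrix (guesses : List (String × String)) : List (List Int) :=
  guesses.foldl pvStepA
    [[0,0,0,0,0],[0,0,0,0,0],[0,0,0,0,0],[0,0,0,0,0],[0,0,0,0,0]]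

-- ===== PORT B =====
-- B: nested grid comprehension; each cell sums 1 over the guesses matching (i,j)
-- B's per-cell count: one pass over guesses summing 1 where the index pair is (i,j)
def pvCell (guesses : List (String × String)) (i j : Nat) : Int :=
  guesses.foldl (fun acc g =>
    if pvStringToIndex g.1 = i ∧ pvStringToIndex g.2 = j then acc + 1 else acc) 0

def agreement_matrix_alt (guesses : List (String × String)) : List (List Int) :=
  (List.range 5).map (fun i => (List.range 5).map (fun j => pvCell guesses i j))

-- ===== PRECONDITION & SPEC =====
def Spec_agreement_matrix (guesses : List (String × String)) (out : List (List Int)) : Prop := out = agreement_matrix_alt guesses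
instance (guesses : List (String × String)) (out : List (List Int)) : Decidable (Spec_agreement_matrix guesses out) := by unfold Spec_agreement_matrix; infer_instance

-- ===== CLAIM (what is proved, stated in full; the proofs are below) =====
def Claim_equal_agreement_matrix : Prop := ∀ (guesses : List (String × String)), Dom_agreement_matrix guesses → Spec_agreement_matrix guesses (agreement_matrix guesses)

-- ===== LEMMAS AND PROOFS =====

theorem pvCell_cons (g : String × String) (rest : List (String × String)) (i j : Nat) :
    pvCell (g :: rest) i j =
      (if pvStringToIndex g.1 = i ∧ pvStringToIndex g.2 = j then 1 else 0) + pvCell rest i j := by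
  have shift : ∀ (l : List (String × String)) (c : Int),
      l.foldl (fun acc g =>
        if pvStringToIndex g.1 = i ∧ pvStringToIndex g.2 = j then acc + 1 else acc) c
      = c + pvCell l i j := by
    intro l
    induction l with
    | nil => intro c; simp [pvCell]
    | cons h t ih =>
      intro c
      show (t.foldl (fun acc g =>
          if pvStringToIndex g.1 = i ∧ pvStringToIndex g.2 = j then acc + 1 else acc)
          (if pvStringToIndex h.1 = i ∧ pvStringToIndex h.2 = j then c + 1 else c))
        = c + (t.foldl (fun acc g =>
          if pvStringToIndex g.1 = i ∧ pvStringToIndex g.2 = j then acc + 1 else acc)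
          (if pvStringToIndex h.1 = i ∧ pvStringToIndex h.2 = j then (0:Int) + 1 else 0))
      rw [ih, ih]
      show _ = c + (_ + pvCell t i j)
      split_ifs <;> ring
  show (rest.foldl (fun acc g =>
      if pvStringToIndex g.1 = i ∧ pvStringToIndex g.2 = j then acc + 1 else acc)
      (if pvStringToIndex g.1 = i ∧ pvStringToIndex g.2 = j then (0:Int) + 1 else 0)) = _
  rw [shift]
  split_ifs <;> ring

theorem pvStringToIndex_lt (cat : String) : pvStringToIndex cat < 5 := by
  unfold pvStringToIndex; split_ifs <;> omega

def pvShape (m : List (List Int)) : Prop :=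
  m.length = 5 ∧ ∀ r ∈ m, r.length = 5

theorem pvGetD_eq_getElem {α : Type} (l : List α) (i : Nat) (dflt : α) (h : i < l.length) :
    l.getD i dflt = l[i] := by
  simp [List.getD_eq_getElem?_getD, List.getElem?_eq_getElem h]

theorem pvGetD_set_self {α : Type} (l : List α) (j : Nat) (v : α) (dflt : α)
    (h : j < l.length) : (l.set j v).getD j dflt = v := by
  simp [List.getD_eq_getElem?_getD, h]

theorem pvGetD_set_ne {α : Type} (l : List α) (j b : Nat) (v : α) (dflt : α)
    (h : j ≠ b) : (l.set j v).getD b dflt = l.getD b dflt := by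
  simp [List.getD_eq_getElem?_getD, List.getElem?_set_ne h]

theorem pvStepA_shape (m : List (List Int)) (g : String × String) (h : pvShape m) :
    pvShape (pvStepA m g) := by
  obtain ⟨hlen, hrows⟩ := h
  have him : pvStringToIndex g.1 < m.length := by
    have := pvStringToIndex_lt g.1; omega
  constructor
  · simp [pvStepA, hlen]
  · intro r hr
    rcases List.mem_or_eq_of_mem_set hr with h1 | h1
    · exact hrows r h1
    · subst h1
      rw [List.length_set, pvGetD_eq_getElem m _ [] him]
      exact hrows _ (List.getElem_mem him)

theorem pvStepA_cell (m : List (List Int)) (g : String × String) (h : pvShape m)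
    (a b : Nat) (ha : a < 5) (hb : b < 5) :
    ((pvStepA m g).getD a []).getD b 0 = (m.getD a []).getD b 0 +
      (if pvStringToIndex g.1 = a ∧ pvStringToIndex g.2 = b then 1 else 0) := by
  obtain ⟨hlen, hrows⟩ := h
  have him : pvStringToIndex g.1 < m.length := by
    have := pvStringToIndex_lt g.1; omega
  have hrowlen : (m.getD (pvStringToIndex g.1) []).length = 5 := by
    rw [pvGetD_eq_getElem m _ [] him]; exact hrows _ (List.getElem_mem him)
  by_cases hai : pvStringToIndex g.1 = a
  · subst hai
    rw [pvStepA, pvGetD_set_self _ _ _ _ him]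
    by_cases hbj : pvStringToIndex g.2 = b
    · subst hbj
      rw [pvGetD_set_self _ _ _ _ (by omega : pvStringToIndex g.2 < (m.getD (pvStringToIndex g.1) []).length)]
      simp
    · rw [pvGetD_set_ne _ _ _ _ _ hbj]
      simp [hbj]
  · rw [pvStepA, pvGetD_set_ne _ _ _ _ _ hai]
    simp [hai]

-- A's fold, from any well-shaped matrix, adds B's per-cell count to each cell
theorem pvFoldA_cell (guesses : List (String × String)) :
    ∀ m : List (List Int), pvShape m →
      pvShape (guesses.foldl pvStepA m) ∧
      ∀ a b : Nat, a < 5 → b < 5 →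
        ((guesses.foldl pvStepA m).getD a []).getD b 0
          = (m.getD a []).getD b 0 + pvCell guesses a b := by
  induction guesses with
  | nil => intro m hm; exact ⟨hm, by intro a b _ _; simp [pvCell]⟩
  | cons g rest ih =>
    intro m hm
    obtain ⟨hs, hc⟩ := ih (pvStepA m g) (pvStepA_shape m g hm)
    refine ⟨by simpa using hs, ?_⟩
    intro a b ha hb
    rw [List.foldl_cons, hc a b ha hb, pvStepA_cell m g hm a b ha hb, pvCell_cons]
    ring

theorem pvShape_zero : pvShape [[0,0,0,0,0],[0,0,0,0,0],[0,0,0,0,0],[0,0,0,0,0],[0,0,0,0,0]] := by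
  refine ⟨rfl, ?_⟩; intro r hr; fin_cases hr <;> rfl

theorem pvZero_cell (a b : Nat) (ha : a < 5) (hb : b < 5) :
    (([[0,0,0,0,0],[0,0,0,0,0],[0,0,0,0,0],[0,0,0,0,0],[0,0,0,0,0]] :
      List (List Int)).getD a []).getD b 0 = 0 := by
  interval_cases a <;> interval_cases b <;> rfl

-- ===== VERDICT (by name: the statement is the Claim_ definition above) =====
theorem agreement_matrix_spec : Claim_equal_agreement_matrix := by
  intro guesses _
  unfold Spec_agreement_matrix agreement_matrix agreement_matrix_alt
  obtain ⟨⟨hlen, hrows⟩, hcell⟩ := pvFoldA_cell guesses _ pvShape_zero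
  apply List.ext_getElem (by simp [hlen])
  intro a ha1 ha2
  have ha5 : a < 5 := by rw [hlen] at ha1; exact ha1
  have hrowlen := hrows _ (List.getElem_mem ha1)
  apply List.ext_getElem (by simp [hrowlen])
  intro b hb1 hb2
  have hb5 : b < 5 := by rw [hrowlen] at hb1; exact hb1
  have h := hcell a b ha5 hb5
  rw [pvZero_cell a b ha5 hb5, zero_add,
    pvGetD_eq_getElem _ a [] ha1, pvGetD_eq_getElem _ b 0 hb1] at h
  simp only [List.getElem_map, List.getElem_range]
  exact h
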